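-- pv_equiv track=rewrite | github.com/8mirroz/Maqueensie | scripts/materialize_tier_rules.py | _trim_header
-- ===== SOURCE A (Python) =====
-- from typing import Dict, List
--
-- def _trim_header(header: List[str]) -> List[str]:
--     last_non_empty = -1
--     for idx, value in enumerate(header):
--         if value.strip():
--             last_non_empty = idx
--     if last_non_empty == -1:
--         return []
--     return [h.strip() for h in header[: last_non_empty + 1]]
-- ===== SOURCE B (Python) =====
-- def _trim_header(header):
--     s = [h.strip() for h in header]
--     while s and not s[-1]:
--         s.pop()
--     return s
-- ===== Notes on version B (the rewrite author's own statement) =====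
-- stated objective: simpler
-- what changed: B strips every column first and then pops trailing empty entries from the end of the stripped list, instead of A's forward scan for the last non-empty index followed by a slice-and-strip comprehension.
import Mathlib
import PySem

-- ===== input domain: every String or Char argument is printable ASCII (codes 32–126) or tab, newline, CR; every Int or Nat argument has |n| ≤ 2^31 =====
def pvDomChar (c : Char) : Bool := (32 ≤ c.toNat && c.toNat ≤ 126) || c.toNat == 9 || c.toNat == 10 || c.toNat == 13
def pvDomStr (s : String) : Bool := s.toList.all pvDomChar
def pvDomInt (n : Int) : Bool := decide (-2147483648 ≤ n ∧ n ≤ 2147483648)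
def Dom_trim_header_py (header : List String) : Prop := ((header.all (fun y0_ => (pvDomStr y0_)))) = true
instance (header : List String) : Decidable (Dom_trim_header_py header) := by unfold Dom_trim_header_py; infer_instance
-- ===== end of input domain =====

-- One honest line: B strips all columns first, then pops trailing empties from the
-- end, instead of A's last-non-empty-index scan followed by slice-and-strip (simpler).

-- ===== PORT A =====
-- the 'for idx, value in enumerate(header): if value.strip(): last_non_empty = idx' loop
def pvLastNE (header : List String) : Int :=
  (PySem.List.enumerate header 0).foldl
    (fun acc p => if PySem.Str.strip p.2 ≠ "" then p.1 else acc) (-1)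

def trim_header_py (header : List String) : List String :=
  let last_non_empty := pvLastNE header
  if last_non_empty = -1 then []
  else (PySem.List.slice header none (some (last_non_empty + 1))).map PySem.Str.strip

-- ===== PORT B =====
-- 'while s and not s[-1]: s.pop()'
def pvPopTrail (s : List String) : List String :=
  if h : s.getLast? = some "" then pvPopTrail s.dropLast else s
termination_by s.length
decreasing_by
  have hne : s ≠ [] := by intro hnil; simp [hnil] at h
  have hp : 0 < s.length := List.length_pos_of_ne_nil hne
  simp only [List.length_dropLast]
  omega

def trim_header_py_alt (header : List String) : List String :=
  pvPopTrail (header.map PySem.Str.strip)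

-- ===== PRECONDITION & SPEC =====
def Spec_trim_header_py (header : List String) (out : List String) : Prop := out = trim_header_py_alt header
instance (header : List String) (out : List String) : Decidable (Spec_trim_header_py header out) := by unfold Spec_trim_header_py; infer_instance

-- ===== CLAIM (what is proved, stated in full; the proofs are below) =====
def Claim_equal_trim_header_py : Prop := ∀ (header : List String), Dom_trim_header_py header → Spec_trim_header_py header (trim_header_py header)

-- ===== LEMMAS AND PROOFS =====

theorem pvLastNE_append (l : List String) (a : String) :
    pvLastNE (l ++ [a]) =
      if PySem.Str.strip a ≠ "" then (l.length : Int) else pvLastNE l := by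
  unfold pvLastNE
  rw [PySem.List.enumerate_append, List.foldl_append]
  simp

theorem pvLastNE_bounds (l : List String) :
    -1 ≤ pvLastNE l ∧ pvLastNE l < l.length := by
  induction l using List.reverseRecOn with
  | nil => simp [pvLastNE, PySem.List.enumerate]
  | append_singleton l a ih =>
      rw [pvLastNE_append]
      split_ifs with h
      · simp
      · simp only [List.length_append, List.length_cons, List.length_nil]
        omega

theorem pvPopTrail_append_empty (l : List String) :
    pvPopTrail (l ++ [""]) = pvPopTrail l := by
  rw [pvPopTrail]
  simp

theorem pvPopTrail_append_nonempty (l : List String) (a : String) (h : a ≠ "") :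
    pvPopTrail (l ++ [a]) = l ++ [a] := by
  rw [pvPopTrail]
  simp [h]

theorem trim_header_eq (header : List String) :
    trim_header_py header = trim_header_py_alt header := by
  induction header using List.reverseRecOn with
  | nil => simp [trim_header_py, trim_header_py_alt, pvLastNE, PySem.List.enumerate, pvPopTrail]
  | append_singleton l a ih =>
      unfold trim_header_py trim_header_py_alt at *
      rw [pvLastNE_append]
      by_cases hs : PySem.Str.strip a = ""
      · -- last column blank: both sides reduce to the value on l
        simp only [hs, ne_eq, not_true_eq_false, if_false]
        rw [List.map_append, List.map_cons, List.map_nil, hs,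
            pvPopTrail_append_empty]
        rw [← ih]
        by_cases hneg : pvLastNE l = -1
        · simp [hneg]
        · have hb := pvLastNE_bounds l
          simp only [hneg, if_false]
          congr 1
          rw [PySem.List.slice_to _ (by omega), PySem.List.slice_to _ (by omega)]
          rw [List.take_append_of_le_length (by omega)]
      · -- last column non-blank
        have hlen : ¬ ((l.length : Int) = -1) := by
          have : (0:Int) ≤ l.length := Int.natCast_nonneg _
          omega
        simp only [hs, ne_eq, not_false_eq_true, if_true, hlen, if_false]
        rw [List.map_append, List.map_cons, List.map_nil,
            pvPopTrail_append_nonempty _ _ hs]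
        rw [PySem.List.slice_to _ (by omega)]
        have : ((l.length : Int) + 1).toNat = l.length + 1 := by omega
        rw [this, List.take_of_length_le (by simp), List.map_append]
        simp

-- ===== VERDICT (by name: the statement is the Claim_ definition above) =====
theorem trim_header_py_spec : Claim_equal_trim_header_py := by
  intro header _
  unfold Spec_trim_header_py
  exact trim_header_eq header
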